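-- pv_equiv track=rewrite | github.com/lucas-peixoto/adventofcode | 2023/02-cube-conundrum-part2.py | get_play
-- ===== SOURCE A (Python) =====
-- def get_play(play: str):
--     max_red = 0
--     max_green = 0
--     max_blue = 0
--
--     play = play.split(',')
--     for p in play:
--         p = p.strip().split()
--         if p[1] == 'red' and int(p[0]) > max_red:
--             max_red = int(p[0])
--         elif p[1] == 'green' and int(p[0]) > max_green:
--             max_green = int(p[0])
--         elif p[1] == 'blue' and int(p[0]) > max_blue:
--             max_blue = int(p[0])
--
--     return max_red, max_green, max_blue
-- ===== SOURCE B (Python) =====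
-- def get_play(play: str):
--     # Staged passes: parse once into (color, number-string) pairs, then take
--     # a per-colour maximum with three independent scans of the parsed list.
--     pairs = []
--     for part in play.split(','):
--         toks = part.strip().split()
--         pairs.append((toks[1], toks[0]))  # IndexError here, like A's p[1]
--
--     def best(color):
--         return max([0] + [int(n) for c, n in pairs if c == color])
--
--     return best('red'), best('green'), best('blue')
-- ===== Notes on version B (the rewrite author's own statement) =====
-- stated objective: alternative
-- what changed: Replaces A's single fold over three named accumulators with staged passes: one parsing pass building (color, count) pairs, then three independent filter-and-max scans, one per colour.
import Mathlib
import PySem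

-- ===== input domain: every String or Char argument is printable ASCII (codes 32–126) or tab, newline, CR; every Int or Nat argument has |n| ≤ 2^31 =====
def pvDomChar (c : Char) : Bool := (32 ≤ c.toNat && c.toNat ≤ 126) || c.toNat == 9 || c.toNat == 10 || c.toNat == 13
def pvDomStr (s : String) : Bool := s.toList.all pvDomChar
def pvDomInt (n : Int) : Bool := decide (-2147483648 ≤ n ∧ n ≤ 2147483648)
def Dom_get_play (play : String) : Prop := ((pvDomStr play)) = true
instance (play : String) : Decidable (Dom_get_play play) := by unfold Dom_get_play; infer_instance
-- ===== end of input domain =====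

-- B replaces A's single fold over three named accumulators (if/elif chain) with staged passes:
-- one parsing pass building (color, count) pairs, then three independent filter-and-max scans,
-- one per colour. Same cost; Pre_ excludes exactly the inputs where the Python A raises.

-- ===== PORT A =====
-- the body of A's for-loop, acting on the (max_red, max_green, max_blue) state
def get_play_step (st : Int × Int × Int) (p : String) : Int × Int × Int :=
  let toks := PySem.Str.split₀ (PySem.Str.strip p)       -- p.strip().split()
  match PySem.List.pyGet? toks 1 with                    -- p[1]
  | none => st                                           -- IndexError: excluded by Pre_
  | some c =>
    let n := (PySem.Int.ofStr? (toks.getD 0 "")).getD 0  -- int(p[0]); ValueError excluded by Pre_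
    if c = "red" ∧ n > st.1 then (n, st.2.1, st.2.2)
    else if c = "green" ∧ n > st.2.1 then (st.1, n, st.2.2)
    else if c = "blue" ∧ n > st.2.2 then (st.1, st.2.1, n)
    else st

def get_play (play : String) : Int × Int × Int :=
  ((PySem.Str.split? play ",").getD []).foldl get_play_step (0, 0, 0)

-- ===== PORT B =====
def get_play_alt (play : String) : Int × Int × Int :=
  let parts := (PySem.Str.split? play ",").getD []                    -- play.split(',')
  let pairs := parts.map (fun p =>
    let toks := PySem.Str.split₀ (PySem.Str.strip p)                  -- part.strip().split()
    ((PySem.List.pyGet? toks 1).getD "",                              -- toks[1]; IndexError excluded by Pre_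
     (PySem.List.pyGet? toks 0).getD ""))                             -- toks[0]
  let best := fun (color : String) =>                                 -- max([0] + [int(n) ...])
    (((pairs.filter (fun pr => pr.1 = color)).map
        (fun pr => (PySem.Int.ofStr? pr.2).getD 0))).foldl max 0
  (best "red", best "green", best "blue")

-- ===== PRECONDITION & SPEC =====
-- Pre_: exactly the inputs on which the Python A returns normally — every comma segment has at
-- least two whitespace tokens (else IndexError) and, when the second token is a known colour,
-- the first token parses as an int (else ValueError).
def Pre_get_play (play : String) : Prop :=
  ∀ p ∈ (PySem.Str.split? play ",").getD [],
    2 ≤ (PySem.Str.split₀ (PySem.Str.strip p)).length ∧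
    (((PySem.Str.split₀ (PySem.Str.strip p)).getD 1 "" = "red" ∨
      (PySem.Str.split₀ (PySem.Str.strip p)).getD 1 "" = "green" ∨
      (PySem.Str.split₀ (PySem.Str.strip p)).getD 1 "" = "blue") →
      (PySem.Int.ofStr? ((PySem.Str.split₀ (PySem.Str.strip p)).getD 0 "")).isSome = true)
instance (play : String) : Decidable (Pre_get_play play) := by unfold Pre_get_play; infer_instance
def pvWitness_get_play : String := "3 red, 14 green, 2 blue, 5 red"

def Spec_get_play (play : String) (out : Int × Int × Int) : Prop := out = get_play_alt play
instance (play : String) (out : Int × Int × Int) : Decidable (Spec_get_play play out) := by unfold Spec_get_play; infer_instance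

-- ===== CLAIM (what is proved, stated in full; the proofs are below) =====
def Claim_equal_get_play : Prop := ∀ (play : String), Dom_get_play play → Pre_get_play play → Spec_get_play play (get_play play)

-- ===== LEMMAS AND PROOFS =====

-- the (color, number-string) pairs B builds, and its per-colour int lists
def pvPairs (parts : List String) : List (String × String) :=
  parts.map (fun p =>
    let toks := PySem.Str.split₀ (PySem.Str.strip p)
    ((PySem.List.pyGet? toks 1).getD "", (PySem.List.pyGet? toks 0).getD ""))

def pvInts (parts : List String) (color : String) : List Int :=
  ((pvPairs parts).filter (fun pr => pr.1 = color)).map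
    (fun pr => (PySem.Int.ofStr? pr.2).getD 0)

theorem get_play_alt_eq (play : String) :
    get_play_alt play =
      ((pvInts ((PySem.Str.split? play ",").getD []) "red").foldl max 0,
       (pvInts ((PySem.Str.split? play ",").getD []) "green").foldl max 0,
       (pvInts ((PySem.Str.split? play ",").getD []) "blue").foldl max 0) := rfl

-- A's fold tracks, componentwise, the running max over B's per-colour int lists
theorem get_play_loop (parts : List String)
    (hpre : ∀ p ∈ parts, 2 ≤ (PySem.Str.split₀ (PySem.Str.strip p)).length)
    (mr mg mb : Int) :
    parts.foldl get_play_step (mr, mg, mb) =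
      ((pvInts parts "red").foldl max mr,
       (pvInts parts "green").foldl max mg,
       (pvInts parts "blue").foldl max mb) := by
  induction parts generalizing mr mg mb with
  | nil => rfl
  | cons p rest ih =>
    have hp := hpre p (by simp)
    have hrest := fun q hq => hpre q (List.mem_cons_of_mem p hq)
    rcases hE : PySem.Str.split₀ (PySem.Str.strip p) with _ | ⟨a, _ | ⟨c, t⟩⟩
    · rw [hE] at hp; simp at hp
    · rw [hE] at hp; simp at hp
    · have hget1 : PySem.List.pyGet? (a :: c :: t) 1 = some c := by
        simp [PySem.List.pyGet?, PySem.List.pyIdx?]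
      have hget0 : PySem.List.pyGet? (a :: c :: t) 0 = some a :=
        PySem.List.pyGet?_zero_cons a (c :: t)
      have hstep : get_play_step (mr, mg, mb) p =
          (if c = "red" ∧ (PySem.Int.ofStr? a).getD 0 > mr then ((PySem.Int.ofStr? a).getD 0, mg, mb)
           else if c = "green" ∧ (PySem.Int.ofStr? a).getD 0 > mg then (mr, (PySem.Int.ofStr? a).getD 0, mb)
           else if c = "blue" ∧ (PySem.Int.ofStr? a).getD 0 > mb then (mr, mg, (PySem.Int.ofStr? a).getD 0)
           else (mr, mg, mb)) := by
        simp only [get_play_step, hE, hget1]; rfl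
      have hpair : ∀ color, pvInts (p :: rest) color =
          (if c = color then ((PySem.Int.ofStr? a).getD 0) :: pvInts rest color
           else pvInts rest color) := by
        intro color
        unfold pvInts pvPairs
        rw [List.map_cons]
        simp only [hE, hget1, hget0, Option.getD_some, List.filter_cons]
        by_cases hc : c = color
        · rw [if_pos (decide_eq_true hc), List.map_cons, if_pos hc]
        · rw [if_neg (fun h => hc (of_decide_eq_true h)), if_neg hc]
      rw [List.foldl_cons, hstep, hpair "red", hpair "green", hpair "blue"]
      set n := (PySem.Int.ofStr? a).getD 0 with hn
      by_cases h1 : c = "red"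
      · subst h1
        rw [if_pos rfl, if_neg (show ¬("red":String) = "green" by decide),
            if_neg (show ¬("red":String) = "blue" by decide), List.foldl_cons]
        by_cases hr : n > mr
        · have hmax : max mr n = n := by omega
          rw [if_pos ⟨rfl, hr⟩, ih hrest, hmax]
        · have hmax : max mr n = mr := by omega
          rw [if_neg (fun h => hr h.2),
              if_neg (fun h => absurd h.1 (by decide)),
              if_neg (fun h => absurd h.1 (by decide)), ih hrest, hmax]
      · by_cases h2 : c = "green"
        · subst h2
          rw [if_neg (show ¬("green":String) = "red" by decide), if_pos rfl,
              if_neg (show ¬("green":String) = "blue" by decide), List.foldl_cons]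
          by_cases hr : n > mg
          · have hmax : max mg n = n := by omega
            rw [if_neg (fun h => absurd h.1 (by decide)), if_pos ⟨rfl, hr⟩, ih hrest, hmax]
          · have hmax : max mg n = mg := by omega
            rw [if_neg (fun h => absurd h.1 (by decide)),
                if_neg (fun h => hr h.2),
                if_neg (fun h => absurd h.1 (by decide)), ih hrest, hmax]
        · by_cases h3 : c = "blue"
          · subst h3
            rw [if_neg (show ¬("blue":String) = "red" by decide),
                if_neg (show ¬("blue":String) = "green" by decide), if_pos rfl, List.foldl_cons]
            by_cases hr : n > mb
            · have hmax : max mb n = n := by omega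
              rw [if_neg (fun h => absurd h.1 (by decide)),
                  if_neg (fun h => absurd h.1 (by decide)), if_pos ⟨rfl, hr⟩, ih hrest, hmax]
            · have hmax : max mb n = mb := by omega
              rw [if_neg (fun h => absurd h.1 (by decide)),
                  if_neg (fun h => absurd h.1 (by decide)),
                  if_neg (fun h => hr h.2), ih hrest, hmax]
          · rw [if_neg h1, if_neg h2, if_neg h3,
                if_neg (fun h => h1 h.1), if_neg (fun h => h2 h.1), if_neg (fun h => h3 h.1),
                ih hrest]

-- ===== VERDICT (by name: the statement is the Claim_ definition above) =====
theorem get_play_spec : Claim_equal_get_play := by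
  intro play _ hpre
  unfold Spec_get_play
  rw [get_play_alt_eq]
  unfold get_play
  rw [get_play_loop _ (fun p hp => (hpre p hp).1) 0 0 0]
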